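-- pv_equiv track=rewrite | github.com/carologistics/fawkes-robotino | src/tools/clips-analyzer/extractor.py | current_factbase
-- ===== SOURCE A (Python) =====
-- def current_factbase(assert_dictionary, retract_dictionary, point_in_time):
--     factbase = []
--     for timestep in range(point_in_time + 1):
--         if timestep in assert_dictionary:
--             factbase.append(assert_dictionary[timestep])
--         elif timestep in retract_dictionary:
--             if retract_dictionary[timestep] in factbase:
--                 factbase.remove(retract_dictionary[timestep])
--     return factbase
-- ===== SOURCE B (Python) =====
-- def current_factbase(assert_dictionary, retract_dictionary, point_in_time):
--     # Per-fact analysis instead of a global replay: group the in-range events by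
--     # fact; only the final queue DEPTH of a fact matters, and the facts that
--     # survive are the last `depth` asserts of that fact; one global sort of the
--     # surviving (time, fact) pairs restores A's list order.
--     events = sorted(
--         [(t, True, v) for t, v in assert_dictionary.items()
--          if 0 <= t <= point_in_time] +
--         [(t, False, v) for t, v in retract_dictionary.items()
--          if 0 <= t <= point_in_time and t not in assert_dictionary],
--         key=lambda e: e[0])
--     groups = {}
--     for t, is_assert, fact in events:
--         groups.setdefault(fact, []).append((t, is_assert))
--     surviving = []
--     for fact, evs in groups.items():
--         a_times = [t for t, is_assert in evs if is_assert]
--         depth = 0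
--         for _, is_assert in evs:
--             depth = depth + 1 if is_assert else max(depth - 1, 0)
--         surviving.extend((t, fact) for t in a_times[len(a_times) - depth:])
--     surviving.sort(key=lambda e: e[0])
--     return [fact for _, fact in surviving]
-- ===== Notes on version B (the rewrite author's own statement) =====
-- stated objective: faster
-- what changed: B never replays events against a shared factbase (A rescans the factbase for every retract and every timestep 0..point_in_time): it sorts only the in-range events, groups them per fact, computes each fact's final queue depth with a counter (the surviving facts are the last depth asserts of that fact), and restores A's list order with one global sort of the surviving (time, fact) pairs.
import Mathlib
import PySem

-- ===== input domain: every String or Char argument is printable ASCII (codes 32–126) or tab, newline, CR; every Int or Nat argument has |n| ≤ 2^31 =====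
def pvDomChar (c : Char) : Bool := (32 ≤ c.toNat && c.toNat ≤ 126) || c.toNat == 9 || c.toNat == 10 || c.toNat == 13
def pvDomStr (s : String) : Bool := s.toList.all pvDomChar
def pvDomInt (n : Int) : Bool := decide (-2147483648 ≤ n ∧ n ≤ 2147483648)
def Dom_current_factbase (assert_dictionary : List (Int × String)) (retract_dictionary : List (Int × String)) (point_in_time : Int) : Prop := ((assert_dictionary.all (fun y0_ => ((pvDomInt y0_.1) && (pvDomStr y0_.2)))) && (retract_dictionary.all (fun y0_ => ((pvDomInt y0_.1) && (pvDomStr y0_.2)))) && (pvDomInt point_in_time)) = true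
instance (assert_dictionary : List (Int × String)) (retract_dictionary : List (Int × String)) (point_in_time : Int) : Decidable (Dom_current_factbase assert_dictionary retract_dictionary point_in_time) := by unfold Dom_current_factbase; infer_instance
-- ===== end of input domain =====

-- B groups the in-range events per fact, takes each fact's last `depth` asserts
-- (depth = its final queue depth) and restores A's list order with one global sort,
-- instead of A's replay over every timestep with append/remove on a shared factbase
-- (measured faster; same value on association lists with duplicate-free keys).


-- ===== PORT A =====
-- one body of A's loop: 'if timestep in assert: append; elif timestep in retract: remove if present'
def cfStepA (da dr : PySem.Dict Int String) (fb : List String) (t : Int) : List String :=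
  if da.contains t then fb ++ [(da.get? t).getD ""]
  else if dr.contains t then
    let v := (dr.get? t).getD ""
    if fb.contains v then (PySem.List.remove? fb v).getD fb else fb
  else fb

def current_factbase (assert_dictionary : List (Int × String)) (retract_dictionary : List (Int × String)) (point_in_time : Int) : List String :=
  let da := PySem.Dict.mk assert_dictionary
  let dr := PySem.Dict.mk retract_dictionary
  (PySem.List.pyRange 0 (point_in_time + 1) 1).foldl (cfStepA da dr) []

-- ===== PORT B =====
-- B's event list: the two comprehensions over .items() concatenated, sorted by key e[0]
def cfEvents (da dr : PySem.Dict Int String) (pit : Int) : List (Int × Bool × String) :=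
  PySem.List.sorted
    ((da.items.filter (fun p => decide (0 ≤ p.1) && decide (p.1 ≤ pit))).map (fun p => (p.1, true, p.2)) ++
     (dr.items.filter (fun p => decide (0 ≤ p.1) && decide (p.1 ≤ pit) && !da.contains p.1)).map (fun p => (p.1, false, p.2)))
    (fun e => e.1) false

-- one iteration of B's per-fact loop over one group: a_times, the depth counter, the surviving slice
def cfFactBlock (evs : List (Int × Bool)) (fact : String) : List (Int × String) :=
  let a_times := (evs.filter (fun p => p.2)).map (fun p => p.1)
  let depth := evs.foldl (fun d p => if p.2 then d + 1 else max (d - 1) 0) (0 : Int)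
  (PySem.List.slice a_times (some ((a_times.length : Int) - depth)) none).map (fun t => (t, fact))

def current_factbase_alt (assert_dictionary : List (Int × String)) (retract_dictionary : List (Int × String)) (point_in_time : Int) : List String :=
  let da := PySem.Dict.mk assert_dictionary
  let dr := PySem.Dict.mk retract_dictionary
  let events := cfEvents da dr point_in_time
  -- groups.setdefault(fact, []).append((t, is_assert))
  let groups := events.foldl (fun d e => d.modify e.2.2 [] (fun x => x ++ [(e.1, e.2.1)])) PySem.Dict.empty
  let surviving := groups.items.foldl (fun acc p => acc ++ cfFactBlock p.2 p.1) []
  (PySem.List.sorted surviving (fun p => p.1) false).map (fun p => p.2)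

-- ===== PRECONDITION & SPEC =====
-- Pre_ excludes association lists with duplicate keys: there the Python dict they
-- denote is ambiguous (first vs last occurrence), an accident of representation.
def Pre_current_factbase (assert_dictionary : List (Int × String)) (retract_dictionary : List (Int × String)) (point_in_time : Int) : Prop :=
  (assert_dictionary.map Prod.fst).Nodup ∧ (retract_dictionary.map Prod.fst).Nodup
instance (assert_dictionary : List (Int × String)) (retract_dictionary : List (Int × String)) (point_in_time : Int) : Decidable (Pre_current_factbase assert_dictionary retract_dictionary point_in_time) := by unfold Pre_current_factbase; infer_instance

def pvWitness_current_factbase : (List (Int × String)) × (List (Int × String)) × Int := ([(0, "a"), (2, "b")], [(1, "a")], 2)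

def Spec_current_factbase (assert_dictionary : List (Int × String)) (retract_dictionary : List (Int × String)) (point_in_time : Int) (out : List String) : Prop := out = current_factbase_alt assert_dictionary retract_dictionary point_in_time
instance (assert_dictionary : List (Int × String)) (retract_dictionary : List (Int × String)) (point_in_time : Int) (out : List String) : Decidable (Spec_current_factbase assert_dictionary retract_dictionary point_in_time out) := by unfold Spec_current_factbase; infer_instance

-- ===== CLAIM (what is proved, stated in full; the proofs are below) =====
def Claim_equal_current_factbase : Prop := ∀ (assert_dictionary : List (Int × String)) (retract_dictionary : List (Int × String)) (point_in_time : Int), Dom_current_factbase assert_dictionary retract_dictionary point_in_time → Pre_current_factbase assert_dictionary retract_dictionary point_in_time → Spec_current_factbase assert_dictionary retract_dictionary point_in_time (current_factbase assert_dictionary retract_dictionary point_in_time)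

-- ===== LEMMAS AND PROOFS =====

-- proof-side objects: the sorted event list as a mapped time list, and a replay on (time, fact) pairs
def cfClassify (da dr : PySem.Dict Int String) (t : Int) : Int × Bool × String :=
  if da.contains t then (t, true, da.getD t "") else (t, false, dr.getD t "")

def cfRemoveSnd (v : String) : List (Int × String) → List (Int × String)
  | [] => []
  | p :: ps => if p.2 == v then ps else p :: cfRemoveSnd v ps

def cfStepP (st : List (Int × String)) (e : Int × Bool × String) : List (Int × String) :=
  if e.2.1 then st ++ [(e.1, e.2.2)] else cfRemoveSnd e.2.2 st

def cfQStep (w : String) (q : List (Int × String)) (e : Int × Bool × String) : List (Int × String) :=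
  if e.2.2 == w then (if e.2.1 then q ++ [(e.1, w)] else q.tail) else q

def cfAT (w : String) (E : List (Int × Bool × String)) : List (Int × String) :=
  (E.filter (fun e => e.2.1 && e.2.2 == w)).map (fun e => (e.1, w))

theorem cfClassify_fst (da dr : PySem.Dict Int String) (t : Int) : (cfClassify da dr t).1 = t := by
  unfold cfClassify; split <;> rfl

-- folding a step that ignores elements outside p is folding over the filtered list
theorem foldl_filter_of_fix {α β : Type} (f : β → α → β) (p : α → Bool)
    (h : ∀ b x, p x = false → f b x = b) :
    ∀ (l : List α) (b : β), l.foldl f b = (l.filter p).foldl f b := by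
  intro l
  induction l with
  | nil => intro b; rfl
  | cons x xs ih =>
    intro b
    by_cases hx : p x = true
    · simp [List.foldl_cons, hx, ih]
    · simp only [Bool.not_eq_true] at hx
      simp [List.foldl_cons, hx, h b x hx, ih]

theorem cfRemoveSnd_sublist (v : String) : ∀ st : List (Int × String), (cfRemoveSnd v st).Sublist st := by
  intro st; induction st with
  | nil => simp [cfRemoveSnd]
  | cons p ps ih =>
    unfold cfRemoveSnd
    by_cases hp : (p.2 == v) = true
    · simp [hp]
    · simp only [Bool.not_eq_true] at hp
      simp [hp, ih]

theorem mapSnd_removeSnd_of_mem (v : String) :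
    ∀ st : List (Int × String), v ∈ st.map Prod.snd →
      (cfRemoveSnd v st).map Prod.snd = (st.map Prod.snd).erase v := by
  intro st
  induction st with
  | nil => simp
  | cons p ps ih =>
    intro hv
    unfold cfRemoveSnd
    by_cases hp : (p.2 == v) = true
    · have hpe : p.2 = v := by simpa using hp
      simp [hpe, List.erase_cons_head]
    · simp only [Bool.not_eq_true] at hp
      have hne : p.2 ≠ v := by simpa using hp
      have hv' : v ∈ ps.map Prod.snd := by
        simp only [List.map_cons, List.mem_cons] at hv
        rcases hv with h | h
        · exact absurd h.symm hne
        · exact h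
      simp [hp, List.erase_cons_tail, ih hv', List.map_cons]

theorem removeSnd_of_not_mem (v : String) :
    ∀ st : List (Int × String), v ∉ st.map Prod.snd → cfRemoveSnd v st = st := by
  intro st
  induction st with
  | nil => simp [cfRemoveSnd]
  | cons p ps ih =>
    intro hv
    simp only [List.map_cons, List.mem_cons, not_or] at hv
    unfold cfRemoveSnd
    have hp : (p.2 == v) = false := by simpa using (fun h => hv.1 h.symm)
    simp [hp, ih hv.2]

-- A's replay over the filtered time list is the pair replay, projected to facts
theorem foldA_eq_mapSnd_foldP (da dr : PySem.Dict Int String) :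
    ∀ (T : List Int) (st : List (Int × String)),
      (∀ t ∈ T, (da.contains t || dr.contains t) = true) →
      T.foldl (cfStepA da dr) (st.map Prod.snd) = ((T.map (cfClassify da dr)).foldl cfStepP st).map Prod.snd := by
  intro T
  induction T with
  | nil => intro st _; rfl
  | cons t ts ih =>
    intro st h
    have hhd := h t List.mem_cons_self
    have htl : ∀ x ∈ ts, (da.contains x || dr.contains x) = true :=
      fun x hx => h x (List.mem_cons_of_mem _ hx)
    simp only [List.map_cons, List.foldl_cons]
    by_cases hda : da.contains t = true
    · have e1 : cfStepA da dr (st.map Prod.snd) t = (st ++ [(t, da.getD t "")]).map Prod.snd := by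
        simp [cfStepA, hda, PySem.Dict.getD_eq_get?_getD]
      have e2 : cfStepP st (cfClassify da dr t) = st ++ [(t, da.getD t "")] := by
        simp [cfStepP, cfClassify, hda]
      rw [e1, e2, ih _ htl]
    · have hdr : dr.contains t = true := by
        rcases Bool.or_eq_true_iff.mp hhd with h' | h'
        · exact absurd h' hda
        · exact h'
      simp only [Bool.not_eq_true] at hda
      have e2 : cfStepP st (cfClassify da dr t) = cfRemoveSnd (dr.getD t "") st := by
        simp [cfStepP, cfClassify, hda]
      have e1 : cfStepA da dr (st.map Prod.snd) t = (cfRemoveSnd (dr.getD t "") st).map Prod.snd := by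
        unfold cfStepA
        rw [show (dr.get? t).getD "" = dr.getD t "" from (PySem.Dict.getD_eq_get?_getD dr t "").symm]
        by_cases hv : dr.getD t "" ∈ st.map Prod.snd
        · rw [mapSnd_removeSnd_of_mem _ st hv]
          simp only [hda, Bool.false_eq_true, if_false, hdr, if_true]
          simp only [PySem.List.remove?_eq_some_erase _ _ hv, Option.getD_some,
            if_pos (by simpa using hv : (st.map Prod.snd).contains (dr.getD t "") = true)]
        · rw [removeSnd_of_not_mem _ st hv]
          simp only [hda, Bool.false_eq_true, if_false, hdr, if_true]
          rw [if_neg]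
          simpa using hv
      rw [e1, e2, ih _ htl]

-- the sorted event list IS the classified filtered range
theorem events_eq (da dr : PySem.Dict Int String) (pit : Int)
    (hda : da.keys.Nodup) (hdr : dr.keys.Nodup) :
    cfEvents da dr pit
      = ((PySem.List.pyRange 0 (pit + 1) 1).filter (fun t => da.contains t || dr.contains t)).map (cfClassify da dr) := by
  have hTpw : ((PySem.List.pyRange 0 (pit + 1) 1).filter (fun t => da.contains t || dr.contains t)).Pairwise (· < ·) :=
    List.Pairwise.sublist List.filter_sublist (PySem.List.pairwise_lt_pyRange_one _ _)
  have hpair : (((PySem.List.pyRange 0 (pit + 1) 1).filter (fun t => da.contains t || dr.contains t)).map (cfClassify da dr)).Pairwise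
      (fun a b => a.1 < b.1) := by
    rw [List.pairwise_map]
    refine hTpw.imp ?_
    intro a b h
    rw [cfClassify_fst, cfClassify_fst]
    exact h
  refine PySem.List.sorted_eq_of_perm_of_pairwise_lt _ _ _ ?_ hpair
  have hnd1 : ((da.items.filter (fun p => decide (0 ≤ p.1) && decide (p.1 ≤ pit))).map (fun p => (p.1, true, p.2))).Nodup := by
    refine List.Nodup.map ?_ (List.Nodup.filter _ (List.Nodup.of_map _ hda))
    intro p q hpq
    simp only [Prod.mk.injEq] at hpq
    exact Prod.ext hpq.1 hpq.2.2
  have hnd2 : ((dr.items.filter (fun p => decide (0 ≤ p.1) && decide (p.1 ≤ pit) && !da.contains p.1)).map (fun p => (p.1, false, p.2))).Nodup := by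
    refine List.Nodup.map ?_ (List.Nodup.filter _ (List.Nodup.of_map _ hdr))
    intro p q hpq
    simp only [Prod.mk.injEq] at hpq
    exact Prod.ext hpq.1 hpq.2.2
  have hndU : ((da.items.filter (fun p => decide (0 ≤ p.1) && decide (p.1 ≤ pit))).map (fun p => (p.1, true, p.2)) ++
      (dr.items.filter (fun p => decide (0 ≤ p.1) && decide (p.1 ≤ pit) && !da.contains p.1)).map (fun p => (p.1, false, p.2))).Nodup := by
    rw [List.nodup_append]
    refine ⟨hnd1, hnd2, ?_⟩
    intro a ha1 b hb2
    rcases List.mem_map.mp ha1 with ⟨p, _, hp⟩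
    rcases List.mem_map.mp hb2 with ⟨q, _, hq⟩
    intro hab
    rw [← hp, ← hq] at hab
    simp at hab
  have hndT : (((PySem.List.pyRange 0 (pit + 1) 1).filter (fun t => da.contains t || dr.contains t)).map (cfClassify da dr)).Nodup := by
    refine hpair.imp ?_
    intro a b h he
    rw [he] at h
    exact absurd h (lt_irrefl _)
  refine (List.perm_ext_iff_of_nodup hndT hndU).mpr ?_
  intro e
  constructor
  · intro he
    rcases List.mem_map.mp he with ⟨t, ht, rfl⟩
    rcases List.mem_filter.mp ht with ⟨htr, hpred⟩
    have hbounds := PySem.List.mem_pyRange_one.mp htr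
    by_cases hct : da.contains t = true
    · obtain ⟨v, hv⟩ : ∃ v, da.get? t = some v := by
        rw [PySem.Dict.contains_eq_isSome_get?] at hct
        exact Option.isSome_iff_exists.mp hct
      have hitems : (t, v) ∈ da.items := PySem.Dict.mem_items_of_get?_eq_some da hv
      have hcl : cfClassify da dr t = (t, true, v) := by
        unfold cfClassify
        rw [if_pos hct, PySem.Dict.getD_of_get?_eq_some da "" hv]
      rw [hcl]
      refine List.mem_append.mpr (Or.inl ?_)
      refine List.mem_map.mpr ⟨(t, v), ?_, rfl⟩
      refine List.mem_filter.mpr ⟨hitems, ?_⟩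
      simp only [Bool.and_eq_true, decide_eq_true_eq]
      omega
    · have hdr' : dr.contains t = true := by
        rcases Bool.or_eq_true_iff.mp hpred with h' | h'
        · exact absurd h' hct
        · exact h'
      obtain ⟨v, hv⟩ : ∃ v, dr.get? t = some v := by
        rw [PySem.Dict.contains_eq_isSome_get?] at hdr'
        exact Option.isSome_iff_exists.mp hdr'
      have hitems : (t, v) ∈ dr.items := PySem.Dict.mem_items_of_get?_eq_some dr hv
      simp only [Bool.not_eq_true] at hct
      have hcl : cfClassify da dr t = (t, false, v) := by
        unfold cfClassify
        rw [if_neg (by simp [hct]), PySem.Dict.getD_of_get?_eq_some dr "" hv]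
      rw [hcl]
      refine List.mem_append.mpr (Or.inr ?_)
      refine List.mem_map.mpr ⟨(t, v), ?_, rfl⟩
      refine List.mem_filter.mpr ⟨hitems, ?_⟩
      simp only [hct, Bool.and_eq_true, decide_eq_true_eq, Bool.not_false, and_true]
      omega
  · intro he
    rcases List.mem_append.mp he with h | h
    · rcases List.mem_map.mp h with ⟨⟨t0, v0⟩, hp, rfl⟩
      rcases List.mem_filter.mp hp with ⟨hitems, hcond⟩
      simp only [Bool.and_eq_true, decide_eq_true_eq] at hcond
      have hget : da.get? t0 = some v0 := PySem.Dict.get?_of_mem_items da hitems hda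
      have hct : da.contains t0 = true := by
        rw [PySem.Dict.contains_eq_isSome_get?, hget]
        rfl
      have hcl : cfClassify da dr t0 = (t0, true, v0) := by
        unfold cfClassify
        rw [if_pos hct, PySem.Dict.getD_of_get?_eq_some da "" hget]
      refine List.mem_map.mpr ⟨t0, ?_, hcl⟩
      refine List.mem_filter.mpr ⟨?_, by simp [hct]⟩
      exact PySem.List.mem_pyRange_one.mpr (by omega)
    · rcases List.mem_map.mp h with ⟨⟨t0, v0⟩, hp, rfl⟩
      rcases List.mem_filter.mp hp with ⟨hitems, hcond⟩
      simp only [Bool.and_eq_true, decide_eq_true_eq, Bool.not_eq_true'] at hcond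
      have hget : dr.get? t0 = some v0 := PySem.Dict.get?_of_mem_items dr hitems hdr
      have hct : dr.contains t0 = true := by
        rw [PySem.Dict.contains_eq_isSome_get?, hget]
        rfl
      have hcl : cfClassify da dr t0 = (t0, false, v0) := by
        unfold cfClassify
        rw [if_neg (by simp [hcond.2]), PySem.Dict.getD_of_get?_eq_some dr "" hget]
      refine List.mem_map.mpr ⟨t0, ?_, hcl⟩
      refine List.mem_filter.mpr ⟨?_, by simp [hct]⟩
      exact PySem.List.mem_pyRange_one.mpr (by omega)

theorem filter_removeSnd (v w : String) :
    ∀ st : List (Int × String),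
      (cfRemoveSnd v st).filter (fun p => p.2 == w) =
        if v == w then ((st.filter (fun p => p.2 == w)).tail) else st.filter (fun p => p.2 == w) := by
  intro st
  induction st with
  | nil => simp [cfRemoveSnd]
  | cons p ps ih =>
    unfold cfRemoveSnd
    by_cases hp : (p.2 == v) = true
    · have hpv : p.2 = v := by simpa using hp
      by_cases hw : (v == w) = true
      · have hvw : v = w := by simpa using hw
        simp [hpv, hvw]
      · simp only [Bool.not_eq_true] at hw
        have : (p.2 == w) = false := by subst hpv; exact hw
        simp [hp, hw, this]
    · simp only [Bool.not_eq_true] at hp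
      simp only [hp, Bool.false_eq_true, if_false]
      by_cases hw : (v == w) = true
      · have hvw : v = w := by simpa using hw
        have hpw : (p.2 == w) = false := by
          subst hvw; exact hp
        simp [List.filter_cons, hpw, ih, hw]
      · simp only [Bool.not_eq_true] at hw
        simp [List.filter_cons, ih, hw]

-- projection of the pair replay onto one fact is the per-fact queue replay
theorem filter_foldP (w : String) :
    ∀ (E : List (Int × Bool × String)) (st : List (Int × String)),
      (E.foldl cfStepP st).filter (fun p => p.2 == w) = E.foldl (cfQStep w) (st.filter (fun p => p.2 == w)) := by
  intro E
  induction E with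
  | nil => intro st; rfl
  | cons e es ih =>
    intro st
    simp only [List.foldl_cons]
    rw [ih]
    congr 1
    unfold cfStepP cfQStep
    by_cases hk : e.2.1 = true
    · simp only [hk, if_true]
      by_cases hv : (e.2.2 == w) = true
      · have : e.2.2 = w := by simpa using hv
        simp [List.filter_append, hv, this]
      · simp only [Bool.not_eq_true] at hv
        simp [List.filter_append, hv]
    · simp only [Bool.not_eq_true] at hk
      simp only [hk, Bool.false_eq_true, if_false]
      rw [filter_removeSnd]

-- the per-fact queue is a suffix of the assert list, of length = the depth counter
theorem foldQ_spec (w : String) :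
    ∀ (E : List (Int × Bool × String)) (q : List (Int × String)),
      (E.foldl (cfQStep w) q) <:+ (q ++ cfAT w E) ∧
      ((E.foldl (cfQStep w) q).length : Int) =
        E.foldl (fun d e => if e.2.2 == w then (if e.2.1 then d + 1 else max (d - 1) 0) else d) (q.length : Int) := by
  intro E
  induction E with
  | nil => intro q; exact ⟨by simp [cfAT], rfl⟩
  | cons e es ih =>
    intro q
    simp only [List.foldl_cons, cfQStep]
    by_cases hv : (e.2.2 == w) = true
    · by_cases hk : e.2.1 = true
      · simp only [hv, hk, if_true]
        have hAT : cfAT w (e :: es) = (e.1, w) :: cfAT w es := by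
          simp [cfAT, List.filter_cons, hk, hv]
        obtain ⟨h1, h2⟩ := ih (q ++ [(e.1, w)])
        refine ⟨?_, ?_⟩
        · rw [hAT]
          simpa [List.append_assoc] using h1
        · simpa using h2
      · simp only [Bool.not_eq_true] at hk
        simp only [hv, hk, Bool.false_eq_true, if_false, if_true]
        have hAT : cfAT w (e :: es) = cfAT w es := by
          simp [cfAT, List.filter_cons, hk]
        have hlen : ((q.tail.length : Int)) = max ((q.length : Int) - 1) 0 := by
          cases q <;> simp
        obtain ⟨h1, h2⟩ := ih q.tail
        refine ⟨?_, ?_⟩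
        · rw [hAT]
          refine h1.trans ?_
          cases q with
          | nil => simp
          | cons a as => exact List.suffix_cons a (as ++ cfAT w es)
        · rw [← hlen]
          exact h2
    · simp only [Bool.not_eq_true] at hv
      simp only [hv, Bool.false_eq_true, if_false]
      have hAT : cfAT w (e :: es) = cfAT w es := by
        simp [cfAT, List.filter_cons, hv]
      obtain ⟨h1, h2⟩ := ih q
      exact ⟨by rw [hAT]; exact h1, h2⟩

theorem suffix_eq_drop {α : Type} {l1 l2 : List α} (h : l1 <:+ l2) :
    l1 = l2.drop (l2.length - l1.length) := by
  obtain ⟨pre, rfl⟩ := h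
  simp

-- B's slice-of-a_times block over the w-group IS the per-fact queue replay
theorem block_eq (w : String) (E : List (Int × Bool × String)) :
    cfFactBlock ((E.filter (fun e => e.2.2 == w)).map (fun e => (e.1, e.2.1))) w = E.foldl (cfQStep w) [] := by
  obtain ⟨hsuf, hlen⟩ := foldQ_spec w E []
  unfold cfFactBlock
  dsimp only
  have hat : ((((E.filter (fun e => e.2.2 == w)).map (fun e => (e.1, e.2.1))).filter (fun p => p.2)).map (fun p => p.1))
      = (E.filter (fun e => e.2.1 && e.2.2 == w)).map (fun e => e.1) := by
    rw [List.filter_map, List.map_map, List.filter_filter]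
    rfl
  have hd : (((E.filter (fun e => e.2.2 == w)).map (fun e => (e.1, e.2.1))).foldl
        (fun d p => if p.2 then d + 1 else max (d - 1) 0) (0 : Int))
      = E.foldl (fun d e => if e.2.2 == w then (if e.2.1 then d + 1 else max (d - 1) 0) else d) (0 : Int) := by
    rw [List.foldl_map,
      ← PySem.List.foldl_if_eq_foldl_filter (fun e => e.2.2 == w)
        (fun (d : Int) (e : Int × Bool × String) => if e.2.1 then d + 1 else max (d - 1) 0) E 0]
  rw [hat, hd]
  set Q := E.foldl (cfQStep w) [] with hQ
  set aT := (E.filter (fun e => e.2.1 && e.2.2 == w)).map (fun e => e.1) with haT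
  have hATeq : cfAT w E = aT.map (fun t => (t, w)) := by
    simp [cfAT, haT, List.map_map]
  have hQle : Q.length ≤ aT.length := by
    have h := hsuf.sublist.length_le
    simpa [hATeq] using h
  have hlen' : (Q.length : Int) =
      E.foldl (fun d e => if e.2.2 == w then (if e.2.1 then d + 1 else max (d - 1) 0) else d) (0 : Int) := by
    simpa using hlen
  rw [← hlen']
  simp only [PySem.List.slice_from aT (by omega : (0:Int) ≤ (aT.length : Int) - (Q.length : Int))]
  have htn : ((aT.length : Int) - (Q.length : Int)).toNat = aT.length - Q.length := by omega
  rw [htn]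
  have hQdrop : Q = (cfAT w E).drop ((cfAT w E).length - Q.length) := suffix_eq_drop hsuf
  rw [hATeq, List.length_map] at hQdrop
  rw [List.map_drop]
  exact hQdrop.symm

theorem mem_foldP :
    ∀ (E : List (Int × Bool × String)) (st : List (Int × String)) (p : Int × String),
      p ∈ E.foldl cfStepP st → p ∈ st ∨ ∃ e ∈ E, e.2.1 = true ∧ p = (e.1, e.2.2) := by
  intro E
  induction E with
  | nil => intro st p hp; exact Or.inl hp
  | cons e es ih =>
    intro st p hp
    rcases ih (cfStepP st e) p hp with h | ⟨e', he', hk, hpe⟩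
    · unfold cfStepP at h
      by_cases hk : e.2.1 = true
      · rw [if_pos hk] at h
        rcases List.mem_append.mp h with h | h
        · exact Or.inl h
        · refine Or.inr ⟨e, List.mem_cons_self, hk, ?_⟩
          simpa using h
      · rw [if_neg hk] at h
        exact Or.inl ((cfRemoveSnd_sublist _ st).subset h)
    · exact Or.inr ⟨e', List.mem_cons_of_mem _ he', hk, hpe⟩

theorem pairwise_foldP :
    ∀ (E : List (Int × Bool × String)) (st : List (Int × String)),
      st.Pairwise (fun p q => p.1 < q.1) →
      E.Pairwise (fun e f => e.1 < f.1) →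
      (∀ p ∈ st, ∀ e ∈ E, p.1 < e.1) →
      (E.foldl cfStepP st).Pairwise (fun p q => p.1 < q.1) := by
  intro E
  induction E with
  | nil => intro st hst _ _; exact hst
  | cons e es ih =>
    intro st hst hE hcross
    simp only [List.foldl_cons]
    have hEtail : es.Pairwise (fun e f => e.1 < f.1) := (List.pairwise_cons.mp hE).2
    have hEhead : ∀ f ∈ es, e.1 < f.1 := (List.pairwise_cons.mp hE).1
    apply ih
    · unfold cfStepP
      by_cases hk : e.2.1 = true
      · rw [if_pos hk]
        rw [List.pairwise_append]
        refine ⟨hst, List.pairwise_singleton _ _, ?_⟩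
        intro p hp q hq
        simp only [List.mem_singleton] at hq
        subst hq
        exact hcross p hp e List.mem_cons_self
      · rw [if_neg hk]
        exact hst.sublist (cfRemoveSnd_sublist _ st)
    · exact hEtail
    · intro p hp f hf
      unfold cfStepP at hp
      by_cases hk : e.2.1 = true
      · rw [if_pos hk] at hp
        rcases List.mem_append.mp hp with h | h
        · exact hcross p h f (List.mem_cons_of_mem _ hf)
        · simp only [List.mem_singleton] at h
          subst h
          exact hEhead f hf
      · rw [if_neg hk] at hp
        exact hcross p ((cfRemoveSnd_sublist _ st).subset hp) f (List.mem_cons_of_mem _ hf)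

theorem flatMap_filter_perm :
    ∀ (ws : List String), ws.Nodup → ∀ (S : List (Int × String)),
      (∀ p ∈ S, p.2 ∈ ws) →
      (ws.flatMap (fun w => S.filter (fun p => p.2 == w))).Perm S := by
  intro ws
  induction ws with
  | nil =>
    intro _ S h
    cases S with
    | nil => rfl
    | cons p ps => exact absurd (h p List.mem_cons_self) (by simp)
  | cons w ws ih =>
    intro hnd S h
    have hw : w ∉ ws := (List.nodup_cons.mp hnd).1
    have hnd' : ws.Nodup := (List.nodup_cons.mp hnd).2
    rw [List.flatMap_cons]
    have hcongr : ws.flatMap (fun u => S.filter (fun p => p.2 == u)) =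
        ws.flatMap (fun u => (S.filter (fun p => !(p.2 == w))).filter (fun p => p.2 == u)) := by
      apply List.flatMap_congr
      intro u hu
      rw [List.filter_filter]
      apply List.filter_congr
      intro p _
      by_cases hp : (p.2 == u) = true
      · have hpu : p.2 = u := by simpa using hp
        have huw : u ≠ w := fun hc => hw (hc ▸ hu)
        have hpw : (p.2 == w) = false := by simp [hpu, huw]
        simp [hp, hpw]
      · simp only [Bool.not_eq_true] at hp
        simp [hp]
    rw [hcongr]
    have hmem : ∀ p ∈ S.filter (fun p => !(p.2 == w)), p.2 ∈ ws := by
      intro p hp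
      rcases List.mem_filter.mp hp with ⟨hpS, hpw⟩
      rcases List.mem_cons.mp (h p hpS) with h' | h'
      · exact absurd h' (by simpa using hpw)
      · exact h' 
    have htail := ih hnd' (S.filter (fun p => !(p.2 == w))) hmem
    exact (htail.append_left _).trans (List.filter_append_perm _ S)

-- ===== VERDICT (by name: the statement is the Claim_ definition above) =====
theorem current_factbase_spec : Claim_equal_current_factbase := by
  intro a r pit _ hpre
  obtain ⟨hna, hnr⟩ := hpre
  unfold Spec_current_factbase current_factbase current_factbase_alt
  dsimp only
  have hda : (PySem.Dict.mk a).keys.Nodup := by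
    simpa [PySem.Dict.keys] using hna
  have hdr : (PySem.Dict.mk r).keys.Nodup := by
    simpa [PySem.Dict.keys] using hnr
  set da := PySem.Dict.mk a with hdaeq
  set dr := PySem.Dict.mk r with hdreq
  rw [foldl_filter_of_fix (cfStepA da dr) (fun t => da.contains t || dr.contains t)
      (by intro b x hx
          unfold cfStepA
          simp only [Bool.or_eq_false_iff] at hx
          simp [hx.1, hx.2])]
  set T := (PySem.List.pyRange 0 (pit + 1) 1).filter (fun t => da.contains t || dr.contains t) with hT
  have hA : T.foldl (cfStepA da dr) [] = ((T.map (cfClassify da dr)).foldl cfStepP []).map Prod.snd := by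
    have h := foldA_eq_mapSnd_foldP da dr T [] (fun t ht => (List.mem_filter.mp ht).2)
    simpa using h
  rw [hA, events_eq da dr pit hda hdr]
  set E := T.map (cfClassify da dr) with hE
  set S := E.foldl cfStepP [] with hS
  set groups := E.foldl (fun d e => d.modify e.2.2 [] (fun x => x ++ [(e.1, e.2.1)])) PySem.Dict.empty with hgroups
  have hgnodup : groups.keys.Nodup :=
    PySem.Dict.nodup_keys_foldl_modify_key E (fun e => e.2.2) [] (fun _ e => fun x => x ++ [(e.1, e.2.1)])
      PySem.Dict.empty PySem.Dict.nodup_keys_empty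
  have hkeys : groups.keys = PySem.Set.ofList (E.map (fun e => e.2.2)) := by
    rw [hgroups, PySem.Dict.keys_foldl_modify_key E (fun e => e.2.2) [] (fun _ e => fun x => x ++ [(e.1, e.2.1)])]
    rfl
  have hgetD : ∀ w, groups.getD w [] = (E.filter (fun e => e.2.2 == w)).map (fun e => (e.1, e.2.1)) := by
    intro w
    have h1 : groups = (E.map (fun e => (e.2.2, (e.1, e.2.1)))).foldl
        (fun d p => d.modify p.1 [] (fun x => x ++ [p.2])) PySem.Dict.empty := by
      rw [List.foldl_map]
    rw [h1, PySem.Dict.getD_foldl_modify_append, List.filter_map, List.map_map]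
    rfl
  rw [PySem.List.foldl_append_eq_flatMap]
  simp only [List.nil_append]
  rw [PySem.Dict.items_eq_map_keys groups hgnodup [], List.flatMap_map]
  have hb : ∀ w, cfFactBlock (groups.getD w []) w = S.filter (fun p => p.2 == w) := by
    intro w
    rw [hgetD w, block_eq w E, hS, filter_foldP w E []]
    rfl
  have hEpair : E.Pairwise (fun e f => e.1 < f.1) := by
    rw [hE, List.pairwise_map]
    refine (List.Pairwise.sublist List.filter_sublist (PySem.List.pairwise_lt_pyRange_one _ _)).imp ?_
    intro x y h
    rw [cfClassify_fst, cfClassify_fst]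
    exact h
  have hSpair : S.Pairwise (fun p q => p.1 < q.1) :=
    pairwise_foldP E [] (List.Pairwise.nil) hEpair (by intro p hp; exact absurd hp (List.not_mem_nil))
  have hcover : ∀ p ∈ S, p.2 ∈ groups.keys := by
    intro p hp
    rcases mem_foldP E [] p hp with h | ⟨e, heE, _, rfl⟩
    · exact absurd h (List.not_mem_nil)
    · rw [hkeys]
      exact (PySem.Set.mem_ofList _ _).mpr (List.mem_map.mpr ⟨e, heE, rfl⟩)
  have hperm : (groups.keys.flatMap (fun w => S.filter (fun p => p.2 == w))).Perm S :=
    flatMap_filter_perm _ hgnodup S hcover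
  have hflat : groups.keys.flatMap (fun k => cfFactBlock ((fun k => (k, groups.getD k [])) k).2 ((fun k => (k, groups.getD k [])) k).1) =
      groups.keys.flatMap (fun w => S.filter (fun p => p.2 == w)) :=
    List.flatMap_congr (fun w _ => hb w)
  rw [hflat, PySem.List.sorted_eq_of_perm_of_pairwise_lt _ S _ hperm.symm hSpair]
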